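-- pv_equiv track=rewrite | github.com/binlins/LinLeetcode | 209. Minimum Size Subarray Sum.py | solve
-- ===== SOURCE A (Python) =====
-- def solve(l, s, nums):
--     sums = 0
--     for x in range(len(nums)):
--         sums += nums[x]
--         if x >= l:
--             sums -= nums[x - l]
--         if sums >= s:
--             return True
--     return False
-- ===== SOURCE B (Python) =====
-- def solve(l, s, nums):
--     P = [0]
--     for v in nums:
--         P.append(P[-1] + v)
--     for x in range(len(nums)):
--         start = max(0, x - l + 1)
--         if P[x + 1] - P[start] >= s:
--             return True
--     return False
-- ===== Notes on version B (the rewrite author's own statement) =====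
-- stated objective: alternative
-- what changed: Replaces the maintained running window accumulator with a precomputed prefix-sum table built in a first pass, answering each window sum by two random-access lookups P[x+1]-P[max(0,x-l+1)].
-- outside the precondition, e.g. on solve(-1, -5, [1, 2]): A returns True, B returns True; on solve(-1, 7, [5, -5]): A returns True, B raises IndexError
import Mathlib
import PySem

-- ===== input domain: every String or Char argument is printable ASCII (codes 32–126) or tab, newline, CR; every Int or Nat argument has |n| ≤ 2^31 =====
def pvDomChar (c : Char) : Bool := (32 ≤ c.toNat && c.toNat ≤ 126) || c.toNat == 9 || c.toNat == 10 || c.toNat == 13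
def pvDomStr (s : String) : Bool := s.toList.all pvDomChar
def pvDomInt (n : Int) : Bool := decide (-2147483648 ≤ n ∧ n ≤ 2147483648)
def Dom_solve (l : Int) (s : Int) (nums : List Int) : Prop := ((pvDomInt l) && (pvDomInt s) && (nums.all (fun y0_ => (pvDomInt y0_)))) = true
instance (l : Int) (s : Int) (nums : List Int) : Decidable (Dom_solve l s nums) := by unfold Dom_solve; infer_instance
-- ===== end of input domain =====

-- B replaces A's running sliding-window accumulator with a prefix-sum table built in a
-- first pass and two random-access lookups per window (alternative decomposition, same cost).


-- ===== PORT A =====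
def solveGoA (l s : Int) (nums : List Int) : List Nat → Int → Bool
  | [], _ => false
  | x :: rest, sums =>
    let s1 := sums + PySem.List.pyGetD nums (x : Int) 0
    let s2 := if (x : Int) ≥ l then s1 - PySem.List.pyGetD nums ((x : Int) - l) 0 else s1
    if s2 ≥ s then true else solveGoA l s nums rest s2

def solve (l : Int) (s : Int) (nums : List Int) : Bool :=
  solveGoA l s nums (List.range nums.length) 0

-- ===== PORT B =====
def pvPrefix (nums : List Int) : List Int :=
  nums.foldl (fun P v => P ++ [PySem.List.pyGetD P (-1) 0 + v]) [0]

def solveGoB (l s : Int) (P : List Int) : List Nat → Bool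
  | [] => false
  | x :: rest =>
    let start := max 0 ((x : Int) - l + 1)
    if PySem.List.pyGetD P ((x : Int) + 1) 0 - PySem.List.pyGetD P start 0 ≥ s then true
    else solveGoB l s P rest

def solve_alt (l : Int) (s : Int) (nums : List Int) : Bool :=
  solveGoB l s (pvPrefix nums) (List.range nums.length)

-- ===== PRECONDITION & SPEC =====
-- Pre_ excludes negative window lengths l, on which A's index nums[x-l] runs past the end:
-- A raises IndexError there unless an accidental partial sum triggers an early True.
def Pre_solve (l : Int) (s : Int) (nums : List Int) : Prop := 0 ≤ l
instance (l : Int) (s : Int) (nums : List Int) : Decidable (Pre_solve l s nums) := by unfold Pre_solve; infer_instance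
def pvWitness_solve : Int × Int × List Int := (2, 5, [1, 2, 3, 4])

def Spec_solve (l : Int) (s : Int) (nums : List Int) (out : Bool) : Prop := out = solve_alt l s nums
instance (l : Int) (s : Int) (nums : List Int) (out : Bool) : Decidable (Spec_solve l s nums out) := by unfold Spec_solve; infer_instance

-- ===== CLAIM (what is proved, stated in full; the proofs are below) =====
def Claim_equal_solve : Prop := ∀ (l : Int) (s : Int) (nums : List Int), Dom_solve l s nums → Pre_solve l s nums → Spec_solve l s nums (solve l s nums)

-- ===== LEMMAS AND PROOFS =====

/-- Mathematical scan used to characterise `pvPrefix`'s foldl. -/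
def restScan (c : Int) : List Int → List Int
  | [] => []
  | x :: xs => (c + x) :: restScan (c + x) xs

theorem restScan_length (c : Int) (xs : List Int) : (restScan c xs).length = xs.length := by
  induction xs generalizing c with
  | nil => rfl
  | cons x xs ih => simp [restScan, ih]

theorem pvPrefix_foldl (xs : List Int) : ∀ (ys : List Int) (c : Int),
    xs.foldl (fun P v => P ++ [PySem.List.pyGetD P (-1) 0 + v]) (ys ++ [c]) =
      ys ++ c :: restScan c xs := by
  induction xs with
  | nil => intro ys c; simp [restScan]
  | cons x xs ih =>
    intro ys c
    have h : PySem.List.pyGetD (ys ++ [c]) (-1) 0 = c :=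
      PySem.List.pyGetD_neg_one_append_singleton ys c 0
    simp only [List.foldl_cons, h]
    have := ih (ys ++ [c]) (c + x)
    simpa [restScan] using this

theorem pvPrefix_eq (nums : List Int) : pvPrefix nums = 0 :: restScan 0 nums := by
  have := pvPrefix_foldl nums [] 0
  simpa [pvPrefix] using this

theorem restScan_getElem? (xs : List Int) : ∀ (c : Int) (i : Nat), i ≤ xs.length →
    (c :: restScan c xs)[i]? = some (c + (xs.take i).sum) := by
  induction xs with
  | nil =>
    intro c i hi
    simp only [List.length_nil, Nat.le_zero] at hi
    subst hi; simp
  | cons x xs ih =>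
    intro c i hi
    cases i with
    | zero => simp
    | succ j =>
      have := ih (c + x) j (by simpa using hi)
      simp only [restScan, List.getElem?_cons_succ]
      rw [this]
      simp [add_assoc]

theorem pvPrefix_getElem? (nums : List Int) (i : Nat) (hi : i ≤ nums.length) :
    (pvPrefix nums)[i]? = some ((nums.take i).sum) := by
  rw [pvPrefix_eq]
  simpa using restScan_getElem? nums 0 i hi

theorem pvPrefix_length (nums : List Int) : (pvPrefix nums).length = nums.length + 1 := by
  rw [pvPrefix_eq]; simp [restScan_length]

theorem pvPrefix_getD (nums : List Int) (i : Int) (h0 : 0 ≤ i) (hi : i.toNat ≤ nums.length) :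
    PySem.List.pyGetD (pvPrefix nums) i 0 = (nums.take i.toNat).sum := by
  have hlt : i < ((pvPrefix nums).length : Int) := by
    rw [pvPrefix_length]; omega
  rw [PySem.List.pyGetD_eq_getElem (pvPrefix nums) (0:Int) h0 hlt]
  have := pvPrefix_getElem? nums i.toNat hi
  have h2 : i.toNat < (pvPrefix nums).length := by rw [pvPrefix_length]; omega
  simp only [List.getElem?_eq_getElem h2] at this
  exact Option.some.injEq _ _ ▸ (by simpa using this)

/-- Main loop invariant: A's running accumulator entering iteration `x0` equals the
    prefix-sum window difference, so the two loops decide identically. -/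
theorem loop_eq (l s : Int) (nums : List Int) (hl : 0 ≤ l) :
    ∀ (k x0 : Nat) (sums : Int), x0 + k = nums.length →
      sums = (nums.take x0).sum - (nums.take ((x0 : Int) - l).toNat).sum →
      solveGoA l s nums (List.range' x0 k) sums =
        solveGoB l s (pvPrefix nums) (List.range' x0 k) := by
  intro k
  induction k with
  | zero => intro x0 sums _ _; rfl
  | succ k ih =>
    intro x0 sums hn hs
    have hx : x0 < nums.length := by omega
    rw [List.range'_succ]
    show solveGoA l s nums (x0 :: List.range' (x0+1) k) sums = _
    simp only [solveGoA, solveGoB]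
    have hget : PySem.List.pyGetD nums (x0 : Int) 0 = nums[x0] :=
      PySem.List.pyGetD_ofNat nums x0 0 hx
    -- s2 equals the prefix window value
    have key : (if (x0 : Int) ≥ l then sums + PySem.List.pyGetD nums (x0 : Int) 0 - PySem.List.pyGetD nums ((x0 : Int) - l) 0
                else sums + PySem.List.pyGetD nums (x0 : Int) 0)
        = (nums.take (x0 + 1)).sum - (nums.take (((x0 : Int) + 1) - l).toNat).sum := by
      by_cases hcase : (x0 : Int) ≥ l
      · have hd0 : (0 : Int) ≤ (x0 : Int) - l := by omega
        have hdlt : (x0 : Int) - l < (nums.length : Int) := by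
          have : (x0 : Int) < nums.length := by exact_mod_cast hx
          omega
        have hget2 : PySem.List.pyGetD nums ((x0 : Int) - l) 0 = nums[((x0 : Int) - l).toNat] :=
          PySem.List.pyGetD_eq_getElem nums (0:Int) hd0 hdlt
        have hdn : ((x0 : Int) - l).toNat < nums.length := by omega
        have hsucc : (((x0 : Int) + 1) - l).toNat = ((x0 : Int) - l).toNat + 1 := by omega
        rw [if_pos hcase, hget, hget2, hs, hsucc,
          List.sum_take_succ nums x0 hx, List.sum_take_succ nums _ hdn]
        ring
      · have h1 : ((x0 : Int) - l).toNat = 0 := by omega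
        have h2 : (((x0 : Int) + 1) - l).toNat = 0 := by omega
        rw [if_neg hcase, hget, hs, h1, h2, List.sum_take_succ nums x0 hx]
        ring
    have hstart : PySem.List.pyGetD (pvPrefix nums) (max 0 ((x0 : Int) - l + 1)) 0
        = (nums.take (((x0 : Int) + 1) - l).toNat).sum := by
      have h0 : (0 : Int) ≤ max 0 ((x0 : Int) - l + 1) := le_max_left _ _
      have hxlen : (x0 : Int) < nums.length := by exact_mod_cast hx
      have hmax : (max 0 ((x0 : Int) - l + 1)).toNat = (((x0 : Int) + 1) - l).toNat := by
        rcases le_total ((x0 : Int) - l + 1) 0 with hm | hm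
        · rw [max_eq_left hm]; omega
        · rw [max_eq_right hm]; omega
      have hle : (max 0 ((x0 : Int) - l + 1)).toNat ≤ nums.length := by rw [hmax]; omega
      rw [pvPrefix_getD nums _ h0 hle, hmax]
    have htop : PySem.List.pyGetD (pvPrefix nums) ((x0 : Int) + 1) 0 = (nums.take (x0 + 1)).sum := by
      have h0 : (0 : Int) ≤ (x0 : Int) + 1 := by omega
      have hle : ((x0 : Int) + 1).toNat ≤ nums.length := by omega
      have hcast : ((x0 : Int) + 1).toNat = x0 + 1 := by omega
      rw [pvPrefix_getD nums _ h0 hle, hcast]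
    rw [key, hstart, htop]
    by_cases hcond : (nums.take (x0 + 1)).sum - (nums.take (((x0 : Int) + 1) - l).toNat).sum ≥ s
    · simp [hcond]
    · simp only [if_neg hcond]
      exact ih (x0 + 1) _ (by omega) (by push_cast; ring_nf)

-- ===== VERDICT (by name: the statement is the Claim_ definition above) =====
theorem solve_spec : Claim_equal_solve := by
  intro l s nums _ hpre
  have hl : 0 ≤ l := hpre
  unfold Spec_solve solve solve_alt
  have := loop_eq l s nums hl nums.length 0 0 (by omega)
    (by have h0 : (-l).toNat = 0 := by omega
        simp [h0])
  simpa [List.range_eq_range'] using this
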